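-- pv_equiv track=rewrite | github.com/graphsignal/solver-demo | solutions/10-E.py | smallest_non_optimal_sum
-- ===== SOURCE A (Python) =====
-- def smallest_non_optimal_sum(n, values):
--     max_limit = 10000  # Maximum limit for checking sums
--
--     # Sort values and confirm last is 1 as guaranteed
--     coins = sorted(values, reverse=True)
--
--     # Create a DP array to find the optimal number of coins for each sum
--     dp = [float('inf')] * (max_limit + 1)
--     dp[0] = 0  # Base case: 0 coins needed to make the sum of 0
--
--     # Fill out the DP table
--     for coin in coins:
--         for amount in range(coin, max_limit + 1):
--             dp[amount] = min(dp[amount], dp[amount - coin] + 1)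
--
--     # Check each possible sum using greedy vs. optimal (DP) method
--     for x in range(1, max_limit + 1):
--         remaining = x
--         greedy_count = 0
--
--         # Perform a greedy coin count simulation
--         for coin in coins:
--             if remaining >= coin:
--                 greedy_count += remaining // coin
--                 remaining %= coin
--
--         # If greedy requires more coins than dp, it's a non-optimal sum
--         if greedy_count > dp[x]:
--             return x
--
--     # Return -1 if all sums up to max_limit are optimal
--     return -1
-- ===== SOURCE B (Python) =====
-- def smallest_non_optimal_sum(n, values):
--     max_limit = 10000
--
--     coins = sorted(values, reverse=True)
--
--     # BFS over reachable sums: dist[s] = minimum number of coins summing to s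
--     # (None = unreachable).  Each BFS level adds one coin, and a sum's distance
--     # is written only the first time it is reached, so it is exact.
--     dist = [None] * (max_limit + 1)
--     dist[0] = 0
--     frontier = [0]
--     for level in range(1, max_limit + 1):
--         if not frontier:
--             break
--         nxt = []
--         for s in frontier:
--             for coin in coins:
--                 t = s + coin
--                 if 0 < t <= max_limit and dist[t] is None:
--                     dist[t] = level
--                     nxt.append(t)
--         frontier = nxt
--
--     # Greedy simulation vs. BFS optimum (same check as the specification asks)
--     for x in range(1, max_limit + 1):
--         remaining = x
--         greedy_count = 0
--         for coin in coins:
--             if remaining >= coin: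
--                 greedy_count += remaining // coin
--                 remaining %= coin
--         d = dist[x]
--         if d is not None and greedy_count > d:
--             return x
--
--     return -1
-- ===== Notes on version B (the rewrite author's own statement) =====
-- stated objective: alternative
-- what changed: A computes the per-sum optimal coin counts by a coin-major dynamic-programming relaxation sweep over a 10001-entry table; B computes them by breadth-first search over reachable sums (a frontier queue expanded level by level, each sum's distance written only on first reach), then runs the same greedy-vs-optimum scan.
import Mathlib
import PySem

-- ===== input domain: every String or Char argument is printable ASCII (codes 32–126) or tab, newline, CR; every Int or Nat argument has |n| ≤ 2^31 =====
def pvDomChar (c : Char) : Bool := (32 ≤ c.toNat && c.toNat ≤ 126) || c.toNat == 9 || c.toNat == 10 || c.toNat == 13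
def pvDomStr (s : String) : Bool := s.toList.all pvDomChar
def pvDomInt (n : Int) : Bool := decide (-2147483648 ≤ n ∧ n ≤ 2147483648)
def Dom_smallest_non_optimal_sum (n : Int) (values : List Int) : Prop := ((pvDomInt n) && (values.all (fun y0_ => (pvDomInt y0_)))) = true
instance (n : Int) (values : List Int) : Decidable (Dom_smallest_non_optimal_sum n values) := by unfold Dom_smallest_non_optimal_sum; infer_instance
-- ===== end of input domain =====

-- B replaces A's coin-major dynamic-programming sweep (one relaxation pass over all 10001
-- amounts per coin) by a breadth-first search over reachable sums (frontier expanded level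
-- by level, each sum's distance written only on first reach); the greedy simulation and the
-- final scan are unchanged; equivalence is proved on Pre_ (all values ≥ 1 — A raises otherwise).

-- ===== PORT A =====
-- Python's float('inf') table entries are modelled by `Option Nat`: `none` = inf.
def pvOMin (a b : Option Nat) : Option Nat :=
  match a, b with
  | none, b => b
  | some a, none => some a
  | some a, some b => if a ≤ b then some a else some b

def pvOSucc : Option Nat → Option Nat
  | none => none
  | some k => some (k + 1)

def pvAGet (a : Array (Option Nat)) (i : Nat) : Option Nat := a.getD i none

-- the greedy simulation loop (identical Python code in A and B): state (remaining, greedy_count)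
def pvGreedy (coins : List Int) (x : Int) : Int :=
  (coins.foldl (fun (st : Int × Int) coin =>
      if coin ≤ st.1 then (PySem.Int.mod st.1 coin, st.2 + PySem.Int.floordiv st.1 coin) else st)
    (x, 0)).2

-- the final scan (identical Python code in A and B): first x in 1..10000 with greedy > table[x]
def pvScan (coins : List Int) (table : Array (Option Nat)) : Int :=
  match (PySem.List.pyRange 1 10001).find? (fun x =>
      match pvAGet table x.toNat with
      | none => false                       -- greedy_count > inf is False
      | some k => decide ((k : Int) < pvGreedy coins x)) with
  | some x => x
  | none => -1

-- dp[amount] = min(dp[amount], dp[amount - coin] + 1); the guard only makes `.toNat`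
-- total — inside Pre_ (coin ≥ 1, amount ≥ coin) it always holds
def pvStepA (coin : Int) (dp : Array (Option Nat)) (amount : Int) : Array (Option Nat) :=
  if 0 ≤ amount - coin then
    dp.setIfInBounds amount.toNat
      (pvOMin (pvAGet dp amount.toNat) (pvOSucc (pvAGet dp (amount - coin).toNat)))
  else dp

-- `for amount in range(coin, 10001): …` (M generalised for the proofs; A uses M = 10001)
def pvSweepA (coin : Int) (dp : Array (Option Nat)) (M : Int) : Array (Option Nat) :=
  (PySem.List.pyRange coin M).foldl (pvStepA coin) dp

-- `for coin in coins: …` (the whole DP table construction)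
def pvDpA (cs : List Int) (dp : Array (Option Nat)) : Array (Option Nat) :=
  cs.foldl (fun dp coin => pvSweepA coin dp 10001) dp

def smallest_non_optimal_sum (n : Int) (values : List Int) : Int :=
  let coins := PySem.List.sorted values (fun v => v) true
  let dp := pvDpA coins ((Array.replicate 10001 (none : Option Nat)).setIfInBounds 0 (some 0))
  pvScan coins dp

-- ===== PORT B =====
-- one (s, coin) step of the BFS level expansion: state (dist, nxt)
def pvBfsF (level : Nat) (s : Int) (st : Array (Option Nat) × List Int) (c : Int) :
    Array (Option Nat) × List Int :=
  let t := s + c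
  if 0 < t ∧ t ≤ 10000 ∧ pvAGet st.1 t.toNat = none then
    (st.1.setIfInBounds t.toNat (some level), st.2 ++ [t])
  else st

-- `for coin in coins: …` for one frontier element s
def pvBfsStep (cs : List Int) (level : Nat) (st : Array (Option Nat) × List Int) (s : Int) :
    Array (Option Nat) × List Int :=
  cs.foldl (pvBfsF level s) st

-- `for s in frontier: …` (one BFS level: returns (dist, nxt))
def pvBfsLevel (cs : List Int) (level : Nat) (dist : Array (Option Nat)) (frontier : List Int) :
    Array (Option Nat) × List Int :=
  frontier.foldl (pvBfsStep cs level) (dist, [])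

-- `for level in range(1, 10001): if not frontier: break; …`
def pvBfsLoop (cs : List Int) (level : Nat) (dist : Array (Option Nat)) (frontier : List Int) :
    Array (Option Nat) :=
  if level ≤ 10000 then
    if frontier = [] then dist
    else
      let st := pvBfsLevel cs level dist frontier
      pvBfsLoop cs (level + 1) st.1 st.2
  else dist
termination_by 10001 - level

def smallest_non_optimal_sum_alt (n : Int) (values : List Int) : Int :=
  let coins := PySem.List.sorted values (fun v => v) true
  let dist := pvBfsLoop coins 1
    ((Array.replicate 10001 (none : Option Nat)).setIfInBounds 0 (some 0)) [0]
  pvScan coins dist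

-- ===== PRECONDITION & SPEC =====
-- Pre_ excludes exactly the inputs with a value ≤ 0: on any such input A raises
-- (IndexError from the DP sweep for a negative coin, ZeroDivisionError from the greedy
-- simulation for a zero coin) and returns nothing.
def Pre_smallest_non_optimal_sum (n : Int) (values : List Int) : Prop := ∀ v ∈ values, 1 ≤ v
instance (n : Int) (values : List Int) : Decidable (Pre_smallest_non_optimal_sum n values) := by unfold Pre_smallest_non_optimal_sum; infer_instance

def pvWitness_smallest_non_optimal_sum : Int × List Int := (0, [1, 3, 4])

def Spec_smallest_non_optimal_sum (n : Int) (values : List Int) (out : Int) : Prop := out = smallest_non_optimal_sum_alt n values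
instance (n : Int) (values : List Int) (out : Int) : Decidable (Spec_smallest_non_optimal_sum n values out) := by unfold Spec_smallest_non_optimal_sum; infer_instance

-- ===== CLAIM (what is proved, stated in full; the proofs are below) =====
def Claim_equal_smallest_non_optimal_sum : Prop := ∀ (n : Int) (values : List Int), Dom_smallest_non_optimal_sum n values → Pre_smallest_non_optimal_sum n values → Spec_smallest_non_optimal_sum n values (smallest_non_optimal_sum n values)

-- ===== LEMMAS AND PROOFS =====
set_option maxRecDepth 100000

-- `Reach cs k x`: the sum x is reachable with exactly k coins drawn (with repetition) from cs
inductive pvReach (cs : List Int) : Nat → Int → Prop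
  | zero : pvReach cs 0 0
  | step {k : Nat} {x c : Int} : c ∈ cs → pvReach cs k x → pvReach cs (k + 1) (x + c)

-- `pvIsOpt cs x o`: o is the minimum coin count for sum x (none = unreachable)
def pvIsOpt (cs : List Int) (x : Int) : Option Nat → Prop
  | some k => pvReach cs k x ∧ ∀ j, pvReach cs j x → k ≤ j
  | none => ∀ k, ¬ pvReach cs k x

theorem pvReach_nonneg {cs : List Int} (h1 : ∀ c ∈ cs, 1 ≤ c) {k : Nat} {x : Int}
    (h : pvReach cs k x) : 0 ≤ x := by
  induction h with
  | zero => omega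
  | step hc _ ih => have := h1 _ hc; omega

theorem pvReach_le {cs : List Int} (h1 : ∀ c ∈ cs, 1 ≤ c) {k : Nat} {x : Int}
    (h : pvReach cs k x) : (k : Int) ≤ x := by
  induction h with
  | zero => omega
  | step hc _ ih => have := h1 _ hc; push_cast; omega

theorem pvReach_mono {cs cs' : List Int} (h : ∀ c ∈ cs, c ∈ cs') {k : Nat} {x : Int}
    (hr : pvReach cs k x) : pvReach cs' k x := by
  induction hr with
  | zero => exact .zero
  | step hc _ ih => exact .step (h _ hc) ih

theorem pvReach_cons_inv {c : Int} {cs : List Int} {k : Nat} {x : Int}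
    (h : pvReach (c :: cs) k x) :
    pvReach cs k x ∨ ∃ k', k = k' + 1 ∧ pvReach (c :: cs) k' (x - c) := by
  induction h with
  | zero => exact Or.inl .zero
  | @step k' x' d hd hr ih =>
    rcases List.mem_cons.mp hd with rfl | hd
    · right; exact ⟨k', rfl, by simpa using hr⟩
    · rcases ih with h | ⟨k'', rfl, h⟩
      · exact Or.inl (.step hd h)
      · right
        refine ⟨k'' + 1, rfl, ?_⟩
        have := pvReach.step (cs := c :: cs) (List.mem_cons.mpr (Or.inr hd)) h
        convert this using 1
        ring

theorem pvReach_pos_inv {cs : List Int} {k : Nat} {x : Int} (hx : x ≠ 0)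
    (h : pvReach cs k x) : ∃ c ∈ cs, ∃ k', k = k' + 1 ∧ pvReach cs k' (x - c) := by
  cases h with
  | zero => exact absurd rfl hx
  | @step k' x' c hc hr => exact ⟨c, hc, k', rfl, by simpa using hr⟩

theorem pvReach_zero {cs : List Int} {x : Int} (h : pvReach cs 0 x) : x = 0 := by
  cases h; rfl

theorem pvIsOpt_unique {cs : List Int} {x : Int} {o o' : Option Nat}
    (h : pvIsOpt cs x o) (h' : pvIsOpt cs x o') : o = o' := by
  match o, o', h, h' with
  | none, none, _, _ => rfl
  | none, some k, h, h' => exact absurd h'.1 (h k)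
  | some k, none, h, h' => exact absurd h.1 (h' k)
  | some k, some k', h, h' =>
    have := h.2 _ h'.1
    have := h'.2 _ h.1
    simp; omega

theorem pvIsOpt_congr {cs cs' : List Int} (h : ∀ c, c ∈ cs ↔ c ∈ cs') {x : Int} {o : Option Nat}
    (ho : pvIsOpt cs x o) : pvIsOpt cs' x o := by
  match o, ho with
  | none, ho => exact fun k hk => ho k (pvReach_mono (fun c hc => (h c).2 hc) hk)
  | some k, ho =>
    exact ⟨pvReach_mono (fun c hc => (h c).1 hc) ho.1,
      fun j hj => ho.2 j (pvReach_mono (fun c hc => (h c).2 hc) hj)⟩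

theorem pvOpt_exists (cs : List Int) (x : Int) : ∃ o, pvIsOpt cs x o := by
  classical
  by_cases h : ∃ k, pvReach cs k x
  · exact ⟨some (Nat.find h), Nat.find_spec h, fun j hj => Nat.find_min' h hj⟩
  · exact ⟨none, fun k hk => h ⟨k, hk⟩⟩

theorem pvOpt_some_zero {cs : List Int} {x : Int} (h : pvIsOpt cs x (some 0)) : x = 0 :=
  pvReach_zero h.1

theorem pvIsOpt_zero (cs : List Int) : pvIsOpt cs 0 (some 0) :=
  ⟨.zero, fun j _ => Nat.zero_le j⟩

theorem pvReach_step_x {cs : List Int} {c x : Int} (hc : c ∈ cs) {k : Nat}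
    (h : pvReach cs k (x - c)) : pvReach cs (k + 1) x := by
  have := pvReach.step hc h
  simpa using this

-- the coin-major DP recurrence: OPT_{c::pre}(x) = min(OPT_pre(x), OPT_{c::pre}(x-c)+1)
theorem pvOptA_rec {c : Int} {pre : List Int} {x : Int} {o2 o1 : Option Nat}
    (h2 : pvIsOpt pre x o2) (h1 : pvIsOpt (c :: pre) (x - c) o1) :
    pvIsOpt (c :: pre) x (pvOMin o2 (pvOSucc o1)) := by
  have hmem : c ∈ c :: pre := List.mem_cons_self
  have hmono : ∀ {j : Nat}, pvReach pre j x → pvReach (c :: pre) j x :=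
    fun h => pvReach_mono (fun d hd => List.mem_cons_of_mem _ hd) h
  match o2, o1, h2, h1 with
  | none, none, h2, h1 =>
    intro k hk
    rcases pvReach_cons_inv hk with h | ⟨k', rfl, h⟩
    · exact h2 k h
    · exact h1 k' h
  | none, some k1, h2, h1 =>
    refine ⟨pvReach_step_x hmem h1.1, fun j hj => ?_⟩
    rcases pvReach_cons_inv hj with h | ⟨j', rfl, h⟩
    · exact absurd h (h2 j)
    · have := h1.2 j' h; omega
  | some k2, none, h2, h1 =>
    refine ⟨hmono h2.1, fun j hj => ?_⟩
    rcases pvReach_cons_inv hj with h | ⟨j', rfl, h⟩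
    · exact h2.2 j h
    · exact absurd h (h1 j')
  | some k2, some k1, h2, h1 =>
    show pvIsOpt (c :: pre) x (if k2 ≤ k1 + 1 then some k2 else some (k1 + 1))
    split_ifs with hle
    · refine ⟨hmono h2.1, fun j hj => ?_⟩
      rcases pvReach_cons_inv hj with h | ⟨j', rfl, h⟩
      · exact h2.2 j h
      · have := h1.2 j' h; omega
    · refine ⟨pvReach_step_x hmem h1.1, fun j hj => ?_⟩
      rcases pvReach_cons_inv hj with h | ⟨j', rfl, h⟩
      · have := h2.2 j h; omega
      · have := h1.2 j' h; omega

-- below c nothing changes: OPT_{c::pre}(x) = OPT_pre(x) for x < c (all coins ≥ 1)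
theorem pvOptA_lt {c : Int} {pre : List Int} (hpre : ∀ d ∈ pre, 1 ≤ d) (hc : 1 ≤ c)
    {x : Int} (hx : x < c) {o : Option Nat} (ho : pvIsOpt pre x o) : pvIsOpt (c :: pre) x o := by
  have hall : ∀ d ∈ c :: pre, (1:Int) ≤ d := by
    intro d hd; rcases List.mem_cons.mp hd with rfl | hd
    · exact hc
    · exact hpre d hd
  have hnoc : ∀ (j : Nat), ¬ pvReach (c :: pre) j (x - c) := by
    intro j hj
    have := pvReach_nonneg hall hj
    omega
  match o, ho with
  | none, ho =>
    intro k hk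
    rcases pvReach_cons_inv hk with h | ⟨k', rfl, h⟩
    · exact ho k h
    · exact hnoc k' h
  | some k, ho =>
    refine ⟨pvReach_mono (fun d hd => List.mem_cons_of_mem _ hd) ho.1, fun j hj => ?_⟩
    rcases pvReach_cons_inv hj with h | ⟨j', rfl, h⟩
    · exact ho.2 j h
    · exact absurd h (hnoc j')

theorem pvAGet_set (a : Array (Option Nat)) (i : Nat) (v : Option Nat) (j : Nat) (hi : i < a.size) :
    pvAGet (a.setIfInBounds i v) j = if i = j then v else pvAGet a j := by
  unfold pvAGet
  rw [Array.getD_eq_getD_getElem?, Array.getD_eq_getD_getElem?, Array.getElem?_setIfInBounds]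
  by_cases h : i = j
  · subst h; simp [hi]
  · simp [h]

theorem pvAGet_replicate (i : Nat) : pvAGet (Array.replicate 10001 (none : Option Nat)) i = none := by
  unfold pvAGet
  rw [Array.getD_eq_getD_getElem?, Array.getElem?_replicate]
  by_cases h : i < 10001 <;> simp [h]

theorem pvAGet_eq_getElem (a : Array (Option Nat)) (i : Nat) (h : i < a.size) :
    pvAGet a i = a[i] := by
  unfold pvAGet
  rw [Array.getD_eq_getD_getElem?, Array.getElem?_eq_getElem h]
  rfl

-- A's inner sweep for one coin preserves and extends the optimality invariant
theorem pvInnerA (c : Int) (hc : 1 ≤ c) (pre : List Int) (hpre : ∀ d ∈ pre, 1 ≤ d)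
    (dp0 : Array (Option Nat)) (hsz : dp0.size = 10001)
    (H0 : ∀ i : Nat, i ≤ 10000 → pvIsOpt pre (i : Int) (pvAGet dp0 i)) :
    ∀ (M : Int) (hcM : c ≤ M), M ≤ 10001 →
      (pvSweepA c dp0 M).size = 10001 ∧
      ∀ i : Nat, i ≤ 10000 →
        (((i : Int) < M → pvIsOpt (c :: pre) (i : Int) (pvAGet (pvSweepA c dp0 M) i)) ∧
         (M ≤ (i : Int) → pvAGet (pvSweepA c dp0 M) i = pvAGet dp0 i)) := by
  intro M hcM
  induction M, hcM using Int.le_induction with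
  | base =>
    intro _
    unfold pvSweepA
    rw [PySem.List.pyRange_one_eq_nil le_rfl]
    exact ⟨hsz, fun i hi => ⟨fun hlt => pvOptA_lt hpre hc hlt (H0 i hi), fun _ => rfl⟩⟩
  | succ M hcM ih =>
    intro hM1
    have hM : M ≤ 10000 := by omega
    obtain ⟨ihsz, ihinv⟩ := ih (by omega)
    have hstep : pvSweepA c dp0 (M + 1) = pvStepA c (pvSweepA c dp0 M) M := by
      unfold pvSweepA
      rw [PySem.List.pyRange_one_succ_right hcM, List.foldl_append]
      rfl
    have hguard : (0:Int) ≤ M - c := by omega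
    have hset : pvStepA c (pvSweepA c dp0 M) M =
        (pvSweepA c dp0 M).setIfInBounds M.toNat
          (pvOMin (pvAGet (pvSweepA c dp0 M) M.toNat)
            (pvOSucc (pvAGet (pvSweepA c dp0 M) (M - c).toNat))) := by
      unfold pvStepA
      rw [if_pos hguard]
    have hMt : M.toNat < (pvSweepA c dp0 M).size := by omega
    have hMcast : ((M.toNat : Int)) = M := by omega
    constructor
    · rw [hstep, hset, Array.size_setIfInBounds]; exact ihsz
    · intro i hi
      rw [hstep, hset]
      rw [pvAGet_set _ _ _ _ hMt]
      constructor
      · intro hlt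
        by_cases hiM : M.toNat = i
        · rw [if_pos hiM]
          have e1 : pvAGet (pvSweepA c dp0 M) M.toNat = pvAGet dp0 M.toNat :=
            (ihinv M.toNat (by omega)).2 (by omega)
          have o2 : pvIsOpt pre (i : Int) (pvAGet (pvSweepA c dp0 M) M.toNat) := by
            rw [e1]
            have := H0 M.toNat (by omega)
            rw [hMcast] at this
            rw [show ((i : Int)) = M by omega]
            exact this
          have hmc : ((M - c).toNat : Int) = M - c := by omega
          have o1 : pvIsOpt (c :: pre) ((i : Int) - c) (pvAGet (pvSweepA c dp0 M) (M - c).toNat) := by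
            have := (ihinv (M - c).toNat (by omega)).1 (by omega)
            rw [hmc] at this
            rw [show ((i : Int)) = M by omega]
            exact this
          exact pvOptA_rec o2 o1
        · rw [if_neg hiM]
          exact (ihinv i hi).1 (by omega)
      · intro hge
        have hiM : M.toNat ≠ i := by omega
        rw [if_neg hiM]
        exact (ihinv i hi).2 (by omega)

-- A's outer fold over the coins: the final table is optimal for the whole coin list
theorem pvOuterA : ∀ (cs : List Int), (∀ d ∈ cs, 1 ≤ d) → ∀ (done : List Int), (∀ d ∈ done, 1 ≤ d) →
    ∀ (dp0 : Array (Option Nat)), dp0.size = 10001 →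
    (∀ i : Nat, i ≤ 10000 → pvIsOpt done (i : Int) (pvAGet dp0 i)) →
    (pvDpA cs dp0).size = 10001 ∧
    ∀ i : Nat, i ≤ 10000 → pvIsOpt (cs.reverse ++ done) (i : Int) (pvAGet (pvDpA cs dp0) i) := by
  intro cs
  induction cs with
  | nil =>
    intro _ done hdone dp0 hsz H0
    exact ⟨hsz, fun i hi => by simpa using H0 i hi⟩
  | cons c cs ih =>
    intro hcs done hdone dp0 hsz H0
    have hc : 1 ≤ c := hcs c List.mem_cons_self
    have hcs' : ∀ d ∈ cs, 1 ≤ d := fun d hd => hcs d (List.mem_cons_of_mem _ hd)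
    have hdone' : ∀ d ∈ c :: done, 1 ≤ d := by
      intro d hd; rcases List.mem_cons.mp hd with rfl | hd
      · exact hc
      · exact hdone d hd
    have hdpa : pvDpA (c :: cs) dp0 = pvDpA cs (pvSweepA c dp0 10001) := rfl
    have key : (pvSweepA c dp0 10001).size = 10001 ∧
        ∀ i : Nat, i ≤ 10000 → pvIsOpt (c :: done) (i : Int) (pvAGet (pvSweepA c dp0 10001) i) := by
      by_cases hble : c ≤ 10001
      · obtain ⟨s1, inv1⟩ := pvInnerA c hc done hdone dp0 hsz H0 10001 hble le_rfl
        exact ⟨s1, fun i hi => (inv1 i hi).1 (by omega)⟩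
      · have : pvSweepA c dp0 10001 = dp0 := by
          unfold pvSweepA
          rw [PySem.List.pyRange_one_eq_nil (by omega)]
          rfl
        rw [this]
        exact ⟨hsz, fun i hi => pvOptA_lt hdone hc (by omega) (H0 i hi)⟩
    obtain ⟨s2, inv2⟩ := ih hcs' (c :: done) hdone' _ key.1 key.2
    rw [hdpa]
    refine ⟨s2, fun i hi => ?_⟩
    refine pvIsOpt_congr ?_ (inv2 i hi)
    intro y
    simp [List.mem_append, List.mem_reverse, List.mem_cons]

-- ===== B-side (BFS) lemmas =====

-- opt value truncated at level k: what the dist table holds before level k runs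
def pvTrunc (o : Option Nat) (k : Nat) : Option Nat :=
  match o with
  | some j => if j < k then some j else none
  | none => none

-- dist represents all optimal counts < k
def pvRep (cs : List Int) (k : Nat) (d : Array (Option Nat)) : Prop :=
  ∀ i : Nat, i ≤ 10000 → ∀ o, pvIsOpt cs (i : Int) o → pvAGet d i = pvTrunc o k

-- fr is exactly the set of sums with optimal count m
def pvFr (cs : List Int) (m : Nat) (fr : List Int) : Prop :=
  ∀ t : Int, t ∈ fr ↔ (0 ≤ t ∧ t ≤ 10000 ∧ pvIsOpt cs t (some m))

-- mid-level invariant relative to the level's starting table dist0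
def pvJ (cs : List Int) (k : Nat) (dist0 : Array (Option Nat))
    (st : Array (Option Nat) × List Int) : Prop :=
  st.1.size = 10001 ∧
  (∀ i : Nat, i ≤ 10000 → pvAGet st.1 i = pvAGet dist0 i ∨
      (pvAGet dist0 i = none ∧ pvAGet st.1 i = some k ∧ pvIsOpt cs (i : Int) (some k))) ∧
  (∀ t : Int, t ∈ st.2 ↔
      (0 < t ∧ t ≤ 10000 ∧ pvAGet dist0 t.toNat = none ∧ pvAGet st.1 t.toNat = some k))

-- minimality decomposition: an optimal-(k) sum is coin + optimal-(k-1) sum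
theorem pvOpt_decompose {cs : List Int} (hcs : ∀ d ∈ cs, 1 ≤ d) {x : Int} {k : Nat}
    (hk : 1 ≤ k) (h : pvIsOpt cs x (some k)) :
    ∃ c ∈ cs, pvIsOpt cs (x - c) (some (k - 1)) := by
  have hx : x ≠ 0 := by
    have := pvReach_le hcs h.1
    omega
  obtain ⟨c, hc, k', hk', hr⟩ := pvReach_pos_inv hx h.1
  obtain ⟨o, ho⟩ := pvOpt_exists cs (x - c)
  match o, ho with
  | none, ho => exact absurd hr (ho k')
  | some j, ho =>
    have hj1 : j ≤ k' := ho.2 k' hr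
    have hj2 : k ≤ j + 1 := h.2 (j + 1) (pvReach_step_x hc ho.1)
    have : j = k - 1 := by omega
    exact ⟨c, hc, this ▸ ho⟩

-- if no sum in range has optimal count m, none has a larger optimal count either
theorem pvOpt_none_above {cs : List Int} (hcs : ∀ d ∈ cs, 1 ≤ d) (m : Nat)
    (h : ∀ t : Int, 0 ≤ t → t ≤ 10000 → ¬ pvIsOpt cs t (some m)) :
    ∀ j, m ≤ j → ∀ t : Int, 0 ≤ t → t ≤ 10000 → ¬ pvIsOpt cs t (some j) := by
  intro j hj
  induction j, hj using Nat.le_induction with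
  | base => exact h
  | succ j hj ih =>
    intro t ht0 ht1 hopt
    obtain ⟨c, hc, hopt'⟩ := pvOpt_decompose hcs (by omega) hopt
    have hc1 := hcs c hc
    have hnn : 0 ≤ t - c := pvReach_nonneg hcs hopt'.1
    have : j + 1 - 1 = j := by omega
    rw [this] at hopt'
    exact ih (t - c) hnn (by omega) hopt'

-- one (s, coin) step preserves the mid-level invariant
theorem pvBfsF_spec (cs : List Int) (hcs : ∀ d ∈ cs, 1 ≤ d) (k : Nat) (hk : 1 ≤ k)
    (dist0 : Array (Option Nat)) (Hrep : pvRep cs k dist0)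
    (s c : Int) (hc : c ∈ cs) (hsopt : pvIsOpt cs s (some (k - 1)))
    (st : Array (Option Nat) × List Int) (hJ : pvJ cs k dist0 st) :
    pvJ cs k dist0 (pvBfsF k s st c) ∧
    (∀ t ∈ st.2, t ∈ (pvBfsF k s st c).2) ∧
    (∀ i : Nat, pvAGet st.1 i ≠ none → pvAGet (pvBfsF k s st c).1 i = pvAGet st.1 i) ∧
    (0 < s + c → s + c ≤ 10000 → pvAGet (pvBfsF k s st c).1 (s + c).toNat ≠ none) := by
  obtain ⟨hsz, hJ2, hJ3⟩ := hJ
  unfold pvBfsF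
  by_cases hg : 0 < s + c ∧ s + c ≤ 10000 ∧ pvAGet st.1 (s + c).toNat = none
  · rw [if_pos hg]
    obtain ⟨hg1, hg2, hg3⟩ := hg
    have htlt : (s + c).toNat < st.1.size := by omega
    have htcast : (((s + c).toNat : Int)) = s + c := by omega
    have ht10000 : (s + c).toNat ≤ 10000 := by omega
    -- dist0 is none at t (from J clause 2 and guard)
    have hd0 : pvAGet dist0 (s + c).toNat = none := by
      rcases hJ2 (s + c).toNat ht10000 with h | ⟨h, h', _⟩
      · rw [← h]; exact hg3
      · exact h
    -- the new sum has optimal count exactly k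
    have hreach : pvReach cs k (s + c) := by
      have := pvReach.step hc hsopt.1
      have hke : k - 1 + 1 = k := by omega
      rw [hke] at this
      exact this
    have hoptt : pvIsOpt cs (s + c) (some k) := by
      obtain ⟨o, ho⟩ := pvOpt_exists cs (s + c)
      have htr := Hrep (s + c).toNat ht10000 o (by rw [htcast]; exact ho)
      rw [hd0] at htr
      match o, ho with
      | none, ho => exact absurd hreach (ho k)
      | some j, ho =>
        have hjk : ¬ j < k := by
          intro hlt
          simp [pvTrunc, hlt] at htr
        have : j = k := by
          have := ho.2 k hreach
          omega
        exact this ▸ ho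
    refine ⟨⟨by rw [Array.size_setIfInBounds]; exact hsz, ?_, ?_⟩, ?_, ?_, ?_⟩
    · intro i hi
      rw [pvAGet_set _ _ _ _ htlt]
      by_cases hit : (s + c).toNat = i
      · rw [if_pos hit]
        right
        refine ⟨hit ▸ hd0, rfl, ?_⟩
        rw [show ((i : Int)) = s + c by omega]
        exact hoptt
      · rw [if_neg hit]
        exact hJ2 i hi
    · intro t
      simp only [List.mem_append, List.mem_singleton]
      constructor
      · rintro (ht | rfl)
        · obtain ⟨h1, h2, h3, h4⟩ := (hJ3 t).mp ht
          refine ⟨h1, h2, h3, ?_⟩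
          rw [pvAGet_set _ _ _ _ htlt]
          by_cases hit : (s + c).toNat = t.toNat
          · rw [if_pos hit]
          · rw [if_neg hit]; exact h4
        · refine ⟨hg1, hg2, hd0, ?_⟩
          rw [pvAGet_set _ _ _ _ htlt, if_pos rfl]
      · rintro ⟨h1, h2, h3, h4⟩
        rw [pvAGet_set _ _ _ _ htlt] at h4
        by_cases hit : (s + c).toNat = t.toNat
        · right; omega
        · rw [if_neg hit] at h4
          exact Or.inl ((hJ3 t).mpr ⟨h1, h2, h3, h4⟩)
    · intro t ht
      simp only [List.mem_append]
      exact Or.inl ht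
    · intro i hi
      rw [pvAGet_set _ _ _ _ htlt]
      by_cases hit : (s + c).toNat = i
      · exact absurd (hit ▸ hg3) hi
      · rw [if_neg hit]
    · intro _ _
      rw [pvAGet_set _ _ _ _ htlt, if_pos rfl]
      simp
  · rw [if_neg hg]
    refine ⟨⟨hsz, hJ2, hJ3⟩, fun t ht => ht, fun i hi => rfl, ?_⟩
    intro h1 h2
    intro hnone
    exact hg ⟨h1, h2, hnone⟩

-- the fold over the coins for one frontier element s
theorem pvBfsCoinsFold (cs : List Int) (hcs : ∀ d ∈ cs, 1 ≤ d) (k : Nat) (hk : 1 ≤ k)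
    (dist0 : Array (Option Nat)) (Hrep : pvRep cs k dist0)
    (s : Int) (hsopt : pvIsOpt cs s (some (k - 1))) :
    ∀ (todo : List Int), (∀ c ∈ todo, c ∈ cs) →
    ∀ (st : Array (Option Nat) × List Int), pvJ cs k dist0 st →
      pvJ cs k dist0 (todo.foldl (pvBfsF k s) st) ∧
      (∀ t ∈ st.2, t ∈ (todo.foldl (pvBfsF k s) st).2) ∧
      (∀ i : Nat, pvAGet st.1 i ≠ none → pvAGet (todo.foldl (pvBfsF k s) st).1 i = pvAGet st.1 i) ∧
      (∀ c ∈ todo, 0 < s + c → s + c ≤ 10000 →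
        pvAGet (todo.foldl (pvBfsF k s) st).1 (s + c).toNat ≠ none) := by
  intro todo
  induction todo with
  | nil =>
    intro _ st hJ
    exact ⟨hJ, fun t ht => ht, fun i hi => rfl, by simp⟩
  | cons c todo ih =>
    intro hmem st hJ
    have hcin : c ∈ cs := hmem c List.mem_cons_self
    have hmem' : ∀ d ∈ todo, d ∈ cs := fun d hd => hmem d (List.mem_cons_of_mem _ hd)
    obtain ⟨hJ', hmono', hdmono', hset'⟩ := pvBfsF_spec cs hcs k hk dist0 Hrep s c hcin hsopt st hJ
    obtain ⟨ihJ, ihmono, ihdmono, ihset⟩ := ih hmem' (pvBfsF k s st c) hJ'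
    simp only [List.foldl_cons]
    refine ⟨ihJ, fun t ht => ihmono t (hmono' t ht), ?_, ?_⟩
    · intro i hi
      rw [ihdmono i (by rw [hdmono' i hi]; exact hi), hdmono' i hi]
    · intro d hd h1 h2
      rcases List.mem_cons.mp hd with rfl | hd
      · rw [ihdmono _ (hset' h1 h2)]
        exact hset' h1 h2
      · exact ihset d hd h1 h2

-- the fold over the frontier (one whole BFS level)
theorem pvBfsFrontierFold (cs : List Int) (hcs : ∀ d ∈ cs, 1 ≤ d) (k : Nat) (hk : 1 ≤ k)
    (dist0 : Array (Option Nat)) (Hrep : pvRep cs k dist0)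
    (frontier : List Int) (Hf : pvFr cs (k - 1) frontier) :
    ∀ (todo : List Int), (∀ s ∈ todo, s ∈ frontier) →
    ∀ (st : Array (Option Nat) × List Int), pvJ cs k dist0 st →
      pvJ cs k dist0 (todo.foldl (pvBfsStep cs k) st) ∧
      (∀ i : Nat, pvAGet st.1 i ≠ none → pvAGet (todo.foldl (pvBfsStep cs k) st).1 i = pvAGet st.1 i) ∧
      (∀ s ∈ todo, ∀ c ∈ cs, 0 < s + c → s + c ≤ 10000 →
        pvAGet (todo.foldl (pvBfsStep cs k) st).1 (s + c).toNat ≠ none) := by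
  intro todo
  induction todo with
  | nil =>
    intro _ st hJ
    exact ⟨hJ, fun i hi => rfl, by simp⟩
  | cons s todo ih =>
    intro hmem st hJ
    have hsin : s ∈ frontier := hmem s List.mem_cons_self
    have hsopt : pvIsOpt cs s (some (k - 1)) := ((Hf s).mp hsin).2.2
    have hmem' : ∀ d ∈ todo, d ∈ frontier := fun d hd => hmem d (List.mem_cons_of_mem _ hd)
    obtain ⟨hJ', _, hdmono', hset'⟩ :=
      pvBfsCoinsFold cs hcs k hk dist0 Hrep s hsopt cs (fun c hc => hc) st hJ
    obtain ⟨ihJ, ihdmono, ihset⟩ := ih hmem' (pvBfsStep cs k st s) hJ'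
    simp only [List.foldl_cons]
    refine ⟨ihJ, ?_, ?_⟩
    · intro i hi
      have h1 : pvAGet (pvBfsStep cs k st s).1 i = pvAGet st.1 i := hdmono' i hi
      rw [ihdmono i (by rw [h1]; exact hi), h1]
    · intro d hd c hc h1 h2
      rcases List.mem_cons.mp hd with rfl | hd
      · rw [ihdmono _ (hset' c hc h1 h2)]
        exact hset' c hc h1 h2
      · exact ihset d hd c hc h1 h2

-- one whole BFS level advances the representation by one and produces the next frontier
theorem pvBfsLevel_spec (cs : List Int) (hcs : ∀ d ∈ cs, 1 ≤ d) (k : Nat) (hk : 1 ≤ k)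
    (dist0 : Array (Option Nat)) (frontier : List Int)
    (hsz : dist0.size = 10001) (Hrep : pvRep cs k dist0) (Hf : pvFr cs (k - 1) frontier) :
    (pvBfsLevel cs k dist0 frontier).1.size = 10001 ∧
    pvRep cs (k + 1) (pvBfsLevel cs k dist0 frontier).1 ∧
    pvFr cs k (pvBfsLevel cs k dist0 frontier).2 := by
  have hJ0 : pvJ cs k dist0 (dist0, []) := by
    refine ⟨hsz, fun i hi => Or.inl rfl, ?_⟩
    intro t
    simp only [List.not_mem_nil, false_iff]
    rintro ⟨_, _, h3, h4⟩
    rw [h3] at h4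
    simp at h4
  obtain ⟨hJ, _, hcomplete⟩ :=
    pvBfsFrontierFold cs hcs k hk dist0 Hrep frontier Hf frontier (fun s hs => hs) (dist0, []) hJ0
  obtain ⟨hsz', hJ2, hJ3⟩ := hJ
  have hres : pvBfsLevel cs k dist0 frontier = frontier.foldl (pvBfsStep cs k) (dist0, []) := rfl
  rw [hres] at *
  set res := frontier.foldl (pvBfsStep cs k) (dist0, []) with hresdef
  -- every sum with optimal count k in range ends up set to k
  have hfull : ∀ t : Int, 0 ≤ t → t ≤ 10000 → pvIsOpt cs t (some k) →
      pvAGet dist0 t.toNat = none ∧ pvAGet res.1 t.toNat = some k := by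
    intro t ht0 ht1 hopt
    have ht1' : 1 ≤ t := by
      have := pvReach_le hcs hopt.1
      omega
    obtain ⟨c, hc, hopt'⟩ := pvOpt_decompose hcs hk hopt
    have hc1 := hcs c hc
    have hs0 : 0 ≤ t - c := pvReach_nonneg hcs hopt'.1
    have hsfr : t - c ∈ frontier := (Hf (t - c)).mpr ⟨hs0, by omega, hopt'⟩
    have hne := hcomplete (t - c) hsfr c hc (by omega) (by omega)
    rw [show t - c + c = t by ring] at hne
    have htcast : ((t.toNat : Int)) = t := by omega
    have hd0 : pvAGet dist0 t.toNat = none := by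
      have := Hrep t.toNat (by omega) (some k) (by rw [htcast]; exact hopt)
      simp [pvTrunc] at this
      exact this
    rcases hJ2 t.toNat (by omega) with h | ⟨_, h, _⟩
    · rw [h] at hne
      exact absurd hd0 hne
    · exact ⟨hd0, h⟩
  refine ⟨hsz', ?_, ?_⟩
  · intro i hi o ho
    rcases hJ2 i hi with h | ⟨h1, h2, h3⟩
    · rw [h, Hrep i hi o ho]
      match o, ho with
      | none, _ => rfl
      | some j, ho =>
        by_cases hjk : j < k
        · simp [pvTrunc, hjk, show j < k + 1 by omega]
        · by_cases hjk1 : j = k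
          · subst hjk1
            have hfl := (hfull i (by omega) (by omega) ho).2
            simp only [Int.toNat_natCast] at hfl
            rw [h, Hrep i hi (some j) ho] at hfl
            simp [pvTrunc] at hfl
          · simp [pvTrunc, hjk, show ¬ j < k + 1 by omega]
    · have := pvIsOpt_unique ho h3
      subst this
      rw [h2]
      simp [pvTrunc]
  · intro t
    rw [hJ3 t]
    constructor
    · rintro ⟨h1, h2, h3, h4⟩
      refine ⟨by omega, h2, ?_⟩
      rcases hJ2 t.toNat (by omega) with h | ⟨_, _, h⟩
      · rw [h, h3] at h4
        simp at h4
      · rw [show ((t.toNat : Int)) = t by omega] at h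
        exact h
    · rintro ⟨h1, h2, h3⟩
      have ht1 : 1 ≤ t := by
        have := pvReach_le hcs h3.1
        omega
      obtain ⟨hd0, hset⟩ := hfull t h1 h2 h3
      exact ⟨by omega, h2, hd0, hset⟩

-- the BFS main loop produces the exact optimal table
theorem pvBfsLoop_spec (cs : List Int) (hcs : ∀ d ∈ cs, 1 ≤ d) :
    ∀ (m k : Nat), 10001 - k = m → 1 ≤ k → k ≤ 10001 →
    ∀ (dist : Array (Option Nat)) (frontier : List Int),
      dist.size = 10001 → pvRep cs k dist → pvFr cs (k - 1) frontier →
      (pvBfsLoop cs k dist frontier).size = 10001 ∧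
      (∀ i : Nat, i ≤ 10000 → ∀ o, pvIsOpt cs (i : Int) o →
        pvAGet (pvBfsLoop cs k dist frontier) i = o) := by
  intro m
  induction m with
  | zero =>
    intro k hm hk1 hk2 dist frontier hsz Hrep Hf
    have hk : k = 10001 := by omega
    subst hk
    rw [pvBfsLoop, if_neg (by omega)]
    refine ⟨hsz, fun i hi o ho => ?_⟩
    rw [Hrep i hi o ho]
    match o, ho with
    | none, _ => rfl
    | some j, ho =>
      have := pvReach_le hcs ho.1
      simp [pvTrunc, show j < 10001 by omega]
  | succ m ih =>
    intro k hm hk1 hk2 dist frontier hsz Hrep Hf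
    have hk : k ≤ 10000 := by omega
    rw [pvBfsLoop, if_pos hk]
    by_cases hfr : frontier = []
    · rw [if_pos hfr]
      -- empty frontier: no sum has optimal count k-1, hence none ≥ k-1 either
      have hnone : ∀ t : Int, 0 ≤ t → t ≤ 10000 → ¬ pvIsOpt cs t (some (k - 1)) := by
        intro t h1 h2 h3
        have : t ∈ frontier := (Hf t).mpr ⟨h1, h2, h3⟩
        rw [hfr] at this
        exact List.not_mem_nil this
      have habove := pvOpt_none_above hcs (k - 1) hnone
      refine ⟨hsz, fun i hi o ho => ?_⟩
      rw [Hrep i hi o ho]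
      match o, ho with
      | none, _ => rfl
      | some j, ho =>
        have hjk : j < k - 1 ∨ k - 1 ≤ j := by omega
        rcases hjk with hjk | hjk
        · simp [pvTrunc, show j < k by omega]
        · exact absurd ho (habove j hjk (i : Int) (by omega) (by omega))
    · rw [if_neg hfr]
      obtain ⟨hsz', Hrep', Hf'⟩ := pvBfsLevel_spec cs hcs k hk1 dist frontier hsz Hrep Hf
      have hfk : pvFr cs (k + 1 - 1) (pvBfsLevel cs k dist frontier).2 := by
        have : k + 1 - 1 = k := by omega
        rw [this]
        exact Hf'
      exact ih (k + 1) (by omega) (by omega) (by omega)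
        (pvBfsLevel cs k dist frontier).1 (pvBfsLevel cs k dist frontier).2 hsz' Hrep' hfk

theorem pvReach_nil {k : Nat} {x : Int} (h : pvReach [] k x) : x = 0 := by
  induction h with
  | zero => rfl
  | step hc _ _ => exact absurd hc (List.not_mem_nil)

-- ===== VERDICT (by name: the statement is the Claim_ definition above) =====
theorem smallest_non_optimal_sum_spec : Claim_equal_smallest_non_optimal_sum := by
  intro n values _hdom hpre
  unfold Spec_smallest_non_optimal_sum smallest_non_optimal_sum smallest_non_optimal_sum_alt
  have hcs : ∀ d ∈ PySem.List.sorted values (fun v => v) true, 1 ≤ d := by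
    intro d hd
    exact hpre d ((PySem.List.mem_sorted _ _ _ _).mp hd)
  set cs := PySem.List.sorted values (fun v => v) true with hcsdef
  set init := (Array.replicate 10001 (none : Option Nat)).setIfInBounds 0 (some 0) with hinit
  have hsz0 : init.size = 10001 := by
    rw [hinit, Array.size_setIfInBounds, Array.size_replicate]
  have hinitget : ∀ i : Nat, pvAGet init i = if i = 0 then some 0 else none := by
    intro i
    rw [hinit, pvAGet_set _ _ _ _ (by rw [Array.size_replicate]; omega)]
    by_cases h : i = 0
    · simp [h]
    · rw [if_neg (by omega), if_neg h, pvAGet_replicate]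
  -- the initial table represents all optimal counts < 1
  have H0 : ∀ i : Nat, i ≤ 10000 → pvIsOpt [] (i : Int) (pvAGet init i) := by
    intro i hi
    rw [hinitget i]
    by_cases h : i = 0
    · subst h
      simpa using pvIsOpt_zero []
    · rw [if_neg h]
      intro k hk
      have := pvReach_nil hk
      omega
  -- A's table is the optimal table
  obtain ⟨szA, invA⟩ := pvOuterA cs hcs [] (fun d hd => absurd hd List.not_mem_nil) init hsz0 H0
  have invA' : ∀ i : Nat, i ≤ 10000 → pvIsOpt cs (i : Int) (pvAGet (pvDpA cs init) i) := by
    intro i hi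
    refine pvIsOpt_congr ?_ (invA i hi)
    intro y
    simp [List.mem_append, List.mem_reverse]
  -- B's table is the optimal table
  have Hrep1 : pvRep cs 1 init := by
    intro i hi o ho
    rw [hinitget i]
    by_cases h : i = 0
    · subst h
      have := pvIsOpt_unique ho (pvIsOpt_zero cs)
      subst this
      rfl
    · rw [if_neg h]
      match o, ho with
      | none, _ => rfl
      | some j, ho =>
        have hj : j ≠ 0 := by
          intro hj0
          subst hj0
          have := pvOpt_some_zero ho
          omega
        simp [pvTrunc, show ¬ j < 1 by omega]
  have Hf0 : pvFr cs (1 - 1) [0] := by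
    intro t
    simp only [List.mem_singleton]
    constructor
    · rintro rfl
      exact ⟨le_rfl, by norm_num, pvIsOpt_zero cs⟩
    · rintro ⟨_, _, h⟩
      exact (pvOpt_some_zero h).symm ▸ rfl
  obtain ⟨szB, invB⟩ := pvBfsLoop_spec cs hcs 10000 1 (by omega) le_rfl (by omega)
    init [0] hsz0 Hrep1 Hf0
  -- the two tables are equal, hence so are the scans
  have htables : pvDpA cs init = pvBfsLoop cs 1 init [0] := by
    refine Array.ext (by omega) ?_
    intro i h1 h2
    rw [← pvAGet_eq_getElem _ _ h1, ← pvAGet_eq_getElem _ _ h2]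
    exact (invB i (by omega) _ (invA' i (by omega))).symm
  show pvScan cs (pvDpA cs init) = pvScan cs (pvBfsLoop cs 1 init [0])
  rw [htables]
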